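-- pv_equiv track=rewrite | github.com/leskin-in/mipt-bioalgo | hw4/spectrum_variants.py | spectrum_variants
-- ===== SOURCE A (Python) =====
-- AMINO_MASSES = [57, 71, 87, 97, 99, 101, 103, 113, 114, 115, 128, 129, 131, 137, 147, 156, 163, 186]
--
-- def _attach_amino_mass(mass: int) -> list:
--     """
--     "Attach" all possible amino acid masses to the given one and return the masses of results
--     """
--     return list(map(lambda m: m + mass, AMINO_MASSES))
--
-- def spectrum_variants(mass: int) -> int:
--     """
--     Calculate the number of all peptides with the given mass
--     :param mass: mass of the peptide to analyse
--     :return: the number of peptides, each of which has the given 'mass'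
--     """
--     result = 0
--
--     masses = {0: 1}
--     while len(masses) > 0:
--         next_masses = {}
--         for current_mass in masses.keys():
--             new_masses = _attach_amino_mass(current_mass)
--             for m in new_masses:
--                 if m == mass:
--                     result += masses.get(current_mass)
--                 elif m < mass:
--                     next_masses[m] = next_masses.get(m, 0) + masses.get(current_mass)
--         masses = next_masses
--
--     return result
-- ===== SOURCE B (Python) =====
-- AMINO_MASSES = [57, 71, 87, 97, 99, 101, 103, 113, 114, 115, 128, 129, 131, 137, 147, 156, 163, 186]
--
--
-- def spectrum_variants(mass: int) -> int:
--     """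
--     Count the peptides of the given total mass by a 1D coin-change DP:
--     count[m] = sum of count[m - a] over amino-acid masses a (count[0] = 1).
--     """
--     if mass <= 0:
--         return 0
--     count = [1]
--     for m in range(1, mass + 1):
--         count.append(sum(count[m - a] for a in AMINO_MASSES if a <= m))
--     return count[mass]
-- ===== Notes on version B (the rewrite author's own statement) =====
-- stated objective: faster
-- what changed: Replaced the layer-by-layer BFS over dictionaries of reachable masses (one dict per peptide length, re-expanding every reachable mass each round) by a single 1D coin-change DP table count[m] = sum(count[m-a] for amino masses a).
import Mathlib
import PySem

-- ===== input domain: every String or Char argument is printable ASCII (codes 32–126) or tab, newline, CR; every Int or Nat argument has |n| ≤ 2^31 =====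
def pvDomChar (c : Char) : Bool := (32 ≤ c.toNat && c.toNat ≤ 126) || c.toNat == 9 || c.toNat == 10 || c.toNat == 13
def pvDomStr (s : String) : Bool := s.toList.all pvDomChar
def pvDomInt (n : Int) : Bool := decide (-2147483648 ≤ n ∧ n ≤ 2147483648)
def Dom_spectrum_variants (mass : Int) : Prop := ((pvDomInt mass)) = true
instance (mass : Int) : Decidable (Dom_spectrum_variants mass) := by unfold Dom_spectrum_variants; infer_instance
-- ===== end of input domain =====

-- B replaces A's layer-by-layer BFS over dicts of reachable masses by a 1D coin-change DP
-- table (objective: faster; a timing run measured B faster at the largest size).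

-- ===== PORT A =====
-- AMINO_MASSES
def pvAmino : List Int :=
  [57, 71, 87, 97, 99, 101, 103, 113, 114, 115, 128, 129, 131, 137, 147, 156, 163, 186]

-- _attach_amino_mass
def pvAttach (mass : Int) : List Int := pvAmino.map (fun m => m + mass)

-- body of the inner 'for m in new_masses' loop, folded over one key current_mass of masses
def pvStepKey (mass : Int) (masses : PySem.Dict Int Int)
    (st : Int × PySem.Dict Int Int) (cm : Int) : Int × PySem.Dict Int Int :=
  (pvAttach cm).foldl
    (fun st2 m =>
      if m = mass then (st2.1 + masses.getD cm 0, st2.2)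
      else if m < mass then (st2.1, st2.2.insert m (st2.2.getD m 0 + masses.getD cm 0))
      else st2)
    st

-- the 'while len(masses) > 0' loop; the fuel argument only makes the same loop total
-- (each round every key grows by at least 57 and keys stay below mass, so
--  mass.toNat / 57 + 2 rounds always suffice — proved in pvLoopA_eq below).
def pvLoopA (mass : Int) : Nat → Int → PySem.Dict Int Int → Int
  | 0, result, _ => result
  | fuel + 1, result, masses =>
      if masses.size = 0 then result
      else
        let st := masses.keys.foldl (pvStepKey mass masses) (result, PySem.Dict.empty)
        pvLoopA mass fuel st.1 st.2

def spectrum_variants (mass : Int) : Int :=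
  pvLoopA mass (mass.toNat / 57 + 2) 0 (PySem.Dict.empty.insert 0 1)

-- ===== PORT B =====
def spectrum_variants_alt (mass : Int) : Int :=
  if mass ≤ 0 then 0
  else
    let count :=
      (PySem.List.pyRange 1 (mass + 1) 1).foldl
        (fun count m =>
          count ++ [(pvAmino.filter (fun a => a ≤ m)).foldl
                      (fun s a => s + PySem.List.pyGetD count (m - a) 0) 0])
        [1]
    PySem.List.pyGetD count mass 0

-- ===== PRECONDITION & SPEC =====
def Spec_spectrum_variants (mass : Int) (out : Int) : Prop := out = spectrum_variants_alt mass
instance (mass : Int) (out : Int) : Decidable (Spec_spectrum_variants mass out) := by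
  unfold Spec_spectrum_variants; infer_instance

-- ===== CLAIM (what is proved, stated in full; the proofs are below) =====
def Claim_equal_spectrum_variants : Prop :=
  ∀ (mass : Int), Dom_spectrum_variants mass → Spec_spectrum_variants mass (spectrum_variants mass)

-- ===== LEMMAS AND PROOFS =====

-- The common mathematical spec: pvN x = number of ordered amino-mass compositions of x
-- (fuel-indexed; pvNAux_fuel shows any fuel ≥ x.toNat gives the same value).
def pvNAux : Nat → Int → Int
  | 0, x => if x = 0 then 1 else 0
  | fuel + 1, x =>
      if x = 0 then 1
      else if x < 0 then 0
      else (pvAmino.map (fun a => if a ≤ x then pvNAux fuel (x - a) else 0)).sum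

def pvN (x : Int) : Int := pvNAux x.toNat x

theorem pvAmino_ge (a : Int) (ha : a ∈ pvAmino) : 57 ≤ a := by
  fin_cases ha <;> norm_num

theorem pvNAux_fuel : ∀ (n f f' : Nat) (x : Int), x.toNat = n → n ≤ f → n ≤ f' →
    pvNAux f x = pvNAux f' x := by
  intro n
  induction n using Nat.strong_induction_on with
  | _ n ih =>
    intro f f' x hx hf hf'
    rcases lt_trichotomy x 0 with hneg | h0 | hpos
    · cases f <;> cases f' <;> (simp [pvNAux, hneg]; try omega)
    · cases f <;> cases f' <;> simp [pvNAux, h0]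
    · have hn : 1 ≤ n := by omega
      obtain ⟨g, rfl⟩ : ∃ g, f = g + 1 := ⟨f - 1, by omega⟩
      obtain ⟨g', rfl⟩ : ∃ g', f' = g' + 1 := ⟨f' - 1, by omega⟩
      simp only [pvNAux, if_neg (by omega : ¬ x = 0), if_neg (by omega : ¬ x < 0)]
      congr 1
      apply List.map_congr_left
      intro a ha
      have h57 := pvAmino_ge a ha
      by_cases hle : a ≤ x
      · simp only [if_pos hle]
        exact ih (x - a).toNat (by omega) g g' (x - a) rfl (by omega) (by omega)
      · simp [hle]

theorem pvN_pos (x : Int) (hx : 0 < x) :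
    pvN x = (pvAmino.map (fun a => if a ≤ x then pvN (x - a) else 0)).sum := by
  have hn : 1 ≤ x.toNat := by omega
  obtain ⟨g, hg⟩ : ∃ g, x.toNat = g + 1 := ⟨x.toNat - 1, by omega⟩
  unfold pvN
  rw [hg]
  simp only [pvNAux, if_neg (by omega : ¬ x = 0), if_neg (by omega : ¬ x < 0)]
  congr 1
  apply List.map_congr_left
  intro a ha
  have h57 := pvAmino_ge a ha
  by_cases hle : a ≤ x
  · simp only [if_pos hle]
    exact pvNAux_fuel (x - a).toNat g (x - a).toNat (x - a) rfl (by omega) le_rfl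
  · simp [hle]

theorem pvN_zero : pvN 0 = 1 := rfl

-- split form used on the A side: the amino either completes mass exactly, stays below, or overshoots
theorem pvN_pos_split (x : Int) (hx : 0 < x) :
    pvN x = (pvAmino.map (fun a => if a = x then 1 else if a < x then pvN (x - a) else 0)).sum := by
  rw [pvN_pos x hx]
  congr 1
  apply List.map_congr_left
  intro a _
  rcases lt_trichotomy a x with h | h | h
  · simp [h.le, h, h.ne]
  · simp [h, pvN_zero]
  · rw [if_neg (not_le.mpr h), if_neg (by omega : ¬ a = x), if_neg (by omega : ¬ a < x)]

-- weight of a dict: each entry (k, v) stands for v peptides of mass k still to be extended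
def pvW (mass : Int) (d : PySem.Dict Int Int) : Int :=
  (d.items.map (fun p => p.2 * pvN (mass - p.1))).sum

theorem pvW_empty (mass : Int) : pvW mass (PySem.Dict.empty (κ := Int) (ν := Int)) = 0 := rfl

theorem pvW_eq_zero_of_items_nil (mass : Int) (d : PySem.Dict Int Int)
    (h : d.items = []) : pvW mass d = 0 := by simp [pvW, h]

-- sorries below to be discharged
theorem sum_map_replace (mass k old v : Int) :
    ∀ (l : List (Int × Int)), (l.map (·.1)).Nodup → (k, old) ∈ l →
    ((l.map (fun p => if p.1 == k then (k, v) else p)).map (fun p => p.2 * pvN (mass - p.1))).sum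
      = (l.map (fun p => p.2 * pvN (mass - p.1))).sum + (v - old) * pvN (mass - k) := by
  intro l
  induction l with
  | nil => intro _ h; cases h
  | cons p t ih =>
    intro hnd hmem
    simp only [List.map_cons, List.nodup_cons] at hnd
    obtain ⟨hp, hnd'⟩ := hnd
    by_cases hk : p.1 = k
    · have hpe : p = (k, old) := by
        rcases List.mem_cons.mp hmem with h | h
        · exact h.symm
        · exact absurd (hk ▸ List.mem_map_of_mem h) hp
      have htid : t.map (fun q => if q.1 == k then (k, v) else q) = t := by
        calc t.map (fun q => if q.1 == k then (k, v) else q) = t.map id := by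
              apply List.map_congr_left
              intro q hq
              have hq1 : q.1 ≠ k := fun he => hp (hk ▸ he ▸ List.mem_map_of_mem hq)
              simp [hq1]
          _ = t := List.map_id t
      have hbt : (p.1 == k) = true := beq_iff_eq.mpr hk
      simp only [List.map_cons, List.sum_cons, htid, if_pos hbt]
      have h2 : p.2 = old := by rw [hpe]
      rw [hk, h2]
      ring
    · have hmem' : (k, old) ∈ t := by
        rcases List.mem_cons.mp hmem with h | h
        · exact absurd (congrArg Prod.fst h.symm) hk
        · exact h
      have hbt : ¬ ((p.1 == k) = true) := by simp [hk]
      simp only [List.map_cons, List.sum_cons]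
      rw [if_neg hbt, ih hnd' hmem']
      ring

theorem pvW_insert (mass : Int) (d : PySem.Dict Int Int) (hnd : d.keys.Nodup) (k v : Int) :
    pvW mass (d.insert k (d.getD k 0 + v)) = pvW mass d + v * pvN (mass - k) := by
  unfold pvW
  cases hc : d.contains k with
  | false =>
    rw [PySem.Dict.items_insert_of_not_contains (d := d) (k := k) (v := d.getD k 0 + v) (h := hc),
        PySem.Dict.getD_of_not_contains d 0 hc]
    simp [List.sum_append]
  | true =>
    have hsome : (d.get? k).isSome := by rw [← PySem.Dict.contains_eq_isSome_get? d k, hc]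
    obtain ⟨old, hget⟩ := Option.isSome_iff_exists.mp hsome
    have hgetD : d.getD k 0 = old := PySem.Dict.getD_of_get?_eq_some d 0 hget
    have hmem : (k, old) ∈ d.items := PySem.Dict.mem_items_of_get?_eq_some d hget
    rw [PySem.Dict.items_insert_of_contains (d := d) (k := k) (v := d.getD k 0 + v) (h := hc),
        sum_map_replace mass k old (d.getD k 0 + v) d.items hnd hmem, hgetD]
    ring

theorem inner_fold (mass cm v : Int) :
    ∀ (l : List Int) (r : Int) (nx : PySem.Dict Int Int), nx.keys.Nodup →
    (∀ a ∈ l, 57 ≤ a) →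
    (let res := l.foldl
      (fun st2 a =>
        if a + cm = mass then (st2.1 + v, st2.2)
        else if a + cm < mass then (st2.1, st2.2.insert (a + cm) (st2.2.getD (a + cm) 0 + v))
        else st2) (r, nx)
    res.1 + pvW mass res.2
        = r + pvW mass nx
          + v * (l.map (fun a => if a + cm = mass then 1 else if a + cm < mass then pvN (mass - cm - a) else 0)).sum
      ∧ res.2.keys.Nodup
      ∧ (∀ p ∈ res.2.items, p ∈ nx.items ∨ ∃ a ∈ l, p.1 = a + cm ∧ a + cm < mass)) := by
  intro l
  induction l with
  | nil => intro r nx hnd _; refine ⟨by simp, hnd, fun p hp => Or.inl hp⟩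
  | cons a t ih =>
    intro r nx hnd hge
    have ha := hge a (List.mem_cons_self ..)
    have hge' : ∀ b ∈ t, 57 ≤ b := fun b hb => hge b (List.mem_cons_of_mem a hb)
    simp only [List.foldl_cons, List.map_cons, List.sum_cons]
    by_cases h1 : a + cm = mass
    · rw [if_pos h1]
      obtain ⟨e1, e2, e3⟩ := ih (r + v) nx hnd hge'
      refine ⟨by rw [e1, if_pos h1]; ring, e2, fun p hp => ?_⟩
      rcases e3 p hp with h | ⟨b, hb, he⟩
      · exact Or.inl h
      · exact Or.inr ⟨b, List.mem_cons_of_mem a hb, he⟩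
    · rw [if_neg h1]
      by_cases h2 : a + cm < mass
      · rw [if_pos h2]
        obtain ⟨e1, e2, e3⟩ :=
          ih r (nx.insert (a + cm) (nx.getD (a + cm) 0 + v))
            (PySem.Dict.nodup_keys_insert nx (a + cm) (nx.getD (a + cm) 0 + v) hnd) hge'
        refine ⟨?_, e2, fun p hp => ?_⟩
        · rw [e1, pvW_insert mass nx hnd (a + cm) v, if_neg h1, if_pos h2,
              (by ring : mass - (a + cm) = mass - cm - a)]
          ring
        · rcases e3 p hp with h | ⟨b, hb, he⟩
          · rcases (PySem.Dict.mem_items_insert (d := nx) (k := a + cm)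
                (v := nx.getD (a + cm) 0 + v) (p := p)).mp h with h | ⟨h, _⟩
            · exact Or.inr ⟨a, List.mem_cons_self .., by rw [h], h2⟩
            · exact Or.inl h
          · exact Or.inr ⟨b, List.mem_cons_of_mem a hb, he⟩
      · rw [if_neg h2]
        obtain ⟨e1, e2, e3⟩ := ih r nx hnd hge'
        refine ⟨by rw [e1, if_neg h1, if_neg h2]; ring, e2, fun p hp => ?_⟩
        rcases e3 p hp with h | ⟨b, hb, he⟩
        · exact Or.inl h
        · exact Or.inr ⟨b, List.mem_cons_of_mem a hb, he⟩

theorem stepKey_eq (mass : Int) (d : PySem.Dict Int Int) (cm r : Int)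
    (nx : PySem.Dict Int Int) (hnd : nx.keys.Nodup) (hcm : 0 < mass - cm) :
    (pvStepKey mass d (r, nx) cm).1 + pvW mass (pvStepKey mass d (r, nx) cm).2
        = r + pvW mass nx + d.getD cm 0 * pvN (mass - cm)
      ∧ (pvStepKey mass d (r, nx) cm).2.keys.Nodup
      ∧ (∀ p ∈ (pvStepKey mass d (r, nx) cm).2.items,
          p ∈ nx.items ∨ (cm + 57 ≤ p.1 ∧ p.1 < mass)) := by
  have hrw : pvStepKey mass d (r, nx) cm
      = pvAmino.foldl
          (fun st2 a =>
            if a + cm = mass then (st2.1 + d.getD cm 0, st2.2)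
            else if a + cm < mass then
              (st2.1, st2.2.insert (a + cm) (st2.2.getD (a + cm) 0 + d.getD cm 0))
            else st2) (r, nx) := by
    unfold pvStepKey pvAttach
    rw [List.foldl_map]
  obtain ⟨e1, e2, e3⟩ := inner_fold mass cm (d.getD cm 0) pvAmino r nx hnd pvAmino_ge
  rw [hrw]
  refine ⟨?_, e2, fun p hp => ?_⟩
  · rw [e1]
    congr 2
    rw [pvN_pos_split (mass - cm) hcm]
    congr 1
    apply List.map_congr_left
    intro a _
    rw [if_congr (by omega : (a = mass - cm) ↔ (a + cm = mass)) rfl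
        (if_congr (by omega : (a < mass - cm) ↔ (a + cm < mass)) rfl rfl)]
  · rcases e3 p hp with h | ⟨b, hb, he, hlt⟩
    · exact Or.inl h
    · exact Or.inr ⟨by have := pvAmino_ge b hb; omega, by omega⟩

theorem outer_fold (mass B : Int) (d : PySem.Dict Int Int) :
    ∀ (ks : List Int) (r : Int) (nx : PySem.Dict Int Int), nx.keys.Nodup →
    (∀ cm ∈ ks, B ≤ cm ∧ cm < mass) →
    (let res := ks.foldl (pvStepKey mass d) (r, nx)
    res.1 + pvW mass res.2
        = r + pvW mass nx + (ks.map (fun cm => d.getD cm 0 * pvN (mass - cm))).sum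
      ∧ res.2.keys.Nodup
      ∧ (∀ p ∈ res.2.items, p ∈ nx.items ∨ (B + 57 ≤ p.1 ∧ p.1 < mass))) := by
  intro ks
  induction ks with
  | nil => intro r nx hnd _; exact ⟨by simp, hnd, fun p hp => Or.inl hp⟩
  | cons cm t ih =>
    intro r nx hnd hks
    have hcm := hks cm (List.mem_cons_self ..)
    have hks' : ∀ c ∈ t, B ≤ c ∧ c < mass := fun c hc => hks c (List.mem_cons_of_mem cm hc)
    obtain ⟨s1, s2, s3⟩ := stepKey_eq mass d cm r nx hnd (by omega)
    simp only [List.foldl_cons, List.map_cons, List.sum_cons]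
    have hst : pvStepKey mass d (r, nx) cm
        = ((pvStepKey mass d (r, nx) cm).1, (pvStepKey mass d (r, nx) cm).2) := rfl
    rw [hst]
    obtain ⟨e1, e2, e3⟩ :=
      ih (pvStepKey mass d (r, nx) cm).1 (pvStepKey mass d (r, nx) cm).2 s2 hks'
    refine ⟨by rw [e1, s1]; ring, e2, fun p hp => ?_⟩
    rcases e3 p hp with h | h
    · rcases s3 p h with h' | h'
      · exact Or.inl h'
      · exact Or.inr ⟨by omega, h'.2⟩
    · exact Or.inr h

theorem pvLoopA_eq (mass : Int) :
    ∀ (fuel : Nat) (result : Int) (d : PySem.Dict Int Int) (B : Int),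
    d.keys.Nodup → 0 ≤ B → (∀ p ∈ d.items, B ≤ p.1 ∧ p.1 < mass) →
    mass ≤ B + 57 * fuel →
    pvLoopA mass fuel result d = result + pvW mass d := by
  intro fuel
  induction fuel with
  | zero =>
    intro result d B hnd hB hitems hle
    have hnil : d.items = [] := by
      cases h : d.items with
      | nil => rfl
      | cons p t =>
        have := hitems p (h ▸ List.mem_cons_self ..)
        omega
    rw [pvW_eq_zero_of_items_nil mass d hnil]
    simp [pvLoopA]
  | succ fuel ih =>
    intro result d B hnd hB hitems hle
    rw [pvLoopA]
    by_cases hsz : d.size = 0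
    · rw [if_pos hsz]
      have hnil : d.items = [] := List.eq_nil_of_length_eq_zero hsz
      rw [pvW_eq_zero_of_items_nil mass d hnil]
      ring
    · rw [if_neg hsz]
      have hkeys : ∀ cm ∈ d.keys, B ≤ cm ∧ cm < mass := by
        intro cm hcm
        have hk : d.keys = d.items.map (·.1) := rfl
        rw [hk] at hcm
        obtain ⟨p, hp, rfl⟩ := List.mem_map.mp hcm
        exact hitems p hp
      have hnde : (PySem.Dict.empty (κ := Int) (ν := Int)).keys.Nodup := List.nodup_nil
      obtain ⟨e1, e2, e3⟩ := outer_fold mass B d d.keys result PySem.Dict.empty hnde hkeys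
      set st := d.keys.foldl (pvStepKey mass d) (result, PySem.Dict.empty) with hst
      show pvLoopA mass fuel st.1 st.2 = result + pvW mass d
      rw [ih st.1 st.2 (B + 57) e2 (by omega)
          (fun p hp => by
            rcases e3 p hp with h | h
            · cases h
            · exact ⟨by omega, h.2⟩)
          (by omega)]
      have hWd : pvW mass d = (d.keys.map (fun cm => d.getD cm 0 * pvN (mass - cm))).sum := by
        unfold pvW
        rw [PySem.Dict.items_eq_map_keys d hnd 0, List.map_map]
        rfl
      rw [pvW_empty] at e1
      rw [hWd]
      linarith

theorem A_eq_pvN (mass : Int) (h : 0 < mass) : spectrum_variants mass = pvN mass := by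
  unfold spectrum_variants
  have hd : (PySem.Dict.empty.insert 0 1 : PySem.Dict Int Int).items = [(0, 1)] := rfl
  have hnd : (PySem.Dict.empty.insert 0 1 : PySem.Dict Int Int).keys.Nodup := by decide
  rw [pvLoopA_eq mass (mass.toNat / 57 + 2) 0 (PySem.Dict.empty.insert 0 1) 0 hnd le_rfl
      (fun p hp => by
        rw [hd] at hp
        simp only [List.mem_singleton] at hp
        subst hp
        exact ⟨le_rfl, h⟩)
      (by omega)]
  simp [pvW, hd]

theorem foldl_fixed {α β : Type} (f : β → α → β) (l : List α) (s : β)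
    (h : ∀ s' a, a ∈ l → f s' a = s') : l.foldl f s = s := by
  induction l generalizing s with
  | nil => rfl
  | cons a t ih =>
    rw [List.foldl_cons, h s a (List.mem_cons_self ..)]
    exact ih s (fun s' b hb => h s' b (List.mem_cons_of_mem a hb))

theorem stepKey_nonpos (mass : Int) (h : mass ≤ 0) (d : PySem.Dict Int Int)
    (st : Int × PySem.Dict Int Int) : pvStepKey mass d st 0 = st := by
  unfold pvStepKey
  apply foldl_fixed
  intro st2 m hm
  have h57 : 57 ≤ m := by
    unfold pvAttach at hm
    obtain ⟨a, ha, rfl⟩ := List.mem_map.mp hm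
    have := pvAmino_ge a ha
    omega
  rw [if_neg (by omega), if_neg (by omega)]

theorem A_nonpos (mass : Int) (h : mass ≤ 0) : spectrum_variants mass = 0 := by
  unfold spectrum_variants
  have h0 : mass.toNat = 0 := by omega
  rw [h0]
  show pvLoopA mass 2 0 (PySem.Dict.empty.insert 0 1) = 0
  rw [pvLoopA]
  rw [if_neg (by decide : ¬ (PySem.Dict.empty.insert 0 1 : PySem.Dict Int Int).size = 0)]
  have hk : (PySem.Dict.empty.insert 0 1 : PySem.Dict Int Int).keys = [0] := rfl
  show pvLoopA mass 1
      ((PySem.Dict.empty.insert 0 1 : PySem.Dict Int Int).keys.foldl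
        (pvStepKey mass (PySem.Dict.empty.insert 0 1)) ((0 : Int), PySem.Dict.empty)).1
      ((PySem.Dict.empty.insert 0 1 : PySem.Dict Int Int).keys.foldl
        (pvStepKey mass (PySem.Dict.empty.insert 0 1)) ((0 : Int), PySem.Dict.empty)).2 = 0
  rw [hk, List.foldl_cons, List.foldl_nil,
      stepKey_nonpos mass h (PySem.Dict.empty.insert 0 1) ((0 : Int), PySem.Dict.empty)]
  rfl

-- one step of B's DP loop (definitionally the lambda in spectrum_variants_alt)
def pvStepB (count : List Int) (m : Int) : List Int :=
  count ++ [(pvAmino.filter (fun a => a ≤ m)).foldl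
              (fun s a => s + PySem.List.pyGetD count (m - a) 0) 0]

theorem sum_map_filter (p : Int → Bool) (f : Int → Int) :
    ∀ l : List Int, ((l.filter p).map f).sum = (l.map (fun a => if p a then f a else 0)).sum := by
  intro l
  induction l with
  | nil => rfl
  | cons a t ih =>
    by_cases h : p a
    · simp [h, ih]
    · simp [h, ih]

theorem tab_eq : ∀ (n : Nat), 1 ≤ n →
    (PySem.List.pyRange 1 (n : Int) 1).foldl pvStepB [1]
      = (List.range n).map (fun i : Nat => pvN (i : Int)) := by
  intro n
  induction n with
  | zero => omega
  | succ n ih =>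
    intro _
    by_cases h1 : n = 0
    · subst h1
      rw [PySem.List.pyRange_one_eq_nil (by norm_num)]
      simp [pvN_zero]
    · have hn1 : 1 ≤ n := by omega
      have hcast : ((n + 1 : Nat) : Int) = (n : Int) + 1 := by push_cast; ring
      rw [hcast, PySem.List.pyRange_one_succ_right (by exact_mod_cast hn1), List.foldl_append,
          ih hn1, List.foldl_cons, List.foldl_nil, List.range_succ, List.map_append]
      unfold pvStepB
      congr 1
      have hlen : ((List.range n).map (fun i : Nat => pvN (i : Int))).length = n := by simp
      have hget : ∀ a ∈ pvAmino.filter (fun a => a ≤ (n : Int)),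
          PySem.List.pyGetD ((List.range n).map (fun i : Nat => pvN (i : Int))) ((n : Int) - a) 0
            = pvN ((n : Int) - a) := by
        intro a ha
        rw [List.mem_filter] at ha
        have h57 := pvAmino_ge a ha.1
        have hle : a ≤ (n : Int) := by simpa using ha.2
        have h0 : (0 : Int) ≤ (n : Int) - a := by omega
        have h1 : (n : Int) - a
            < ((List.map (fun i : Nat => pvN (i : Int)) (List.range n)).length : Int) := by
          rw [hlen]; omega
        rw [PySem.List.pyGetD_eq_getElem _ 0 h0 h1, List.getElem_map, List.getElem_range]
        congr 1
        omega
      rw [PySem.List.foldl_add, List.map_congr_left hget, sum_map_filter, zero_add]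
      have hifs : (pvAmino.map (fun a => if decide (a ≤ (n : Int)) = true
              then pvN ((n : Int) - a) else 0))
          = pvAmino.map (fun a => if a ≤ (n : Int) then pvN ((n : Int) - a) else 0) := by
        apply List.map_congr_left
        intro a _
        by_cases hle : a ≤ (n : Int) <;> simp [hle]
      rw [hifs, ← pvN_pos (n : Int) (by omega)]
      simp

theorem B_eq_pvN (mass : Int) (h : 0 < mass) : spectrum_variants_alt mass = pvN mass := by
  have hB : spectrum_variants_alt mass
      = PySem.List.pyGetD ((PySem.List.pyRange 1 (mass + 1) 1).foldl pvStepB [1]) mass 0 := by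
    unfold spectrum_variants_alt pvStepB
    rw [if_neg (by omega)]
  rw [hB]
  have hm1 : mass + 1 = ((mass.toNat + 1 : Nat) : Int) := by push_cast; omega
  rw [hm1, tab_eq (mass.toNat + 1) (by omega)]
  have hlen2 : ((List.range (mass.toNat + 1)).map (fun i : Nat => pvN (i : Int))).length
      = mass.toNat + 1 := by simp
  have h0 : (0 : Int) ≤ mass := by omega
  have h1 : mass
      < (((List.range (mass.toNat + 1)).map (fun i : Nat => pvN (i : Int))).length : Int) := by
    rw [hlen2]; omega
  rw [PySem.List.pyGetD_eq_getElem _ 0 h0 h1, List.getElem_map, List.getElem_range]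
  congr 1
  omega

-- ===== VERDICT (by name: the statement is the Claim_ definition above) =====
theorem spectrum_variants_spec : Claim_equal_spectrum_variants := by
  intro mass _
  unfold Spec_spectrum_variants
  by_cases h : mass ≤ 0
  · rw [A_nonpos mass h, spectrum_variants_alt, if_pos h]
  · rw [A_eq_pvN mass (by omega), B_eq_pvN mass (by omega)]
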